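-- pv_equiv track=rewrite | github.com/sylwiagutowska/RKKR_FS | rkkr_fermi_surface_functions.py | which_bands_cross_fermi
-- ===== SOURCE A (Python) =====
-- def which_bands_cross_fermi(ENE0):
--  ENE=[]
--  for i in ENE0:
--   isfermi=0
--   for nj in range(1,len(i)):
--    if i[nj][0]*i[nj-1][0]<=0:
--      isfermi=1
--      break
--   if isfermi==1: ENE.append(i)
--  return ENE
-- ===== SOURCE B (Python) =====
-- def which_bands_cross_fermi(ENE0):
--     def crosses(band):
--         if len(band) < 2:
--             return False
--         vals = [e[0] for e in band]
--         return min(vals) <= 0 <= max(vals)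
--     return [band for band in ENE0 if crosses(band)]
-- ===== Notes on version B (the rewrite author's own statement) =====
-- stated objective: simpler
-- what changed: Replaces the indexed adjacent-pair scan with flag and break by a per-band min/max sign test on the list of first components, using that some adjacent product is <= 0 iff the sequence (length >= 2) contains a non-positive and a non-negative value.
-- outside the precondition, e.g. on which_bands_cross_fermi([[[1], [-1], []]]): A returns [[[1], [-1], []]], B raises IndexError
import Mathlib
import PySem

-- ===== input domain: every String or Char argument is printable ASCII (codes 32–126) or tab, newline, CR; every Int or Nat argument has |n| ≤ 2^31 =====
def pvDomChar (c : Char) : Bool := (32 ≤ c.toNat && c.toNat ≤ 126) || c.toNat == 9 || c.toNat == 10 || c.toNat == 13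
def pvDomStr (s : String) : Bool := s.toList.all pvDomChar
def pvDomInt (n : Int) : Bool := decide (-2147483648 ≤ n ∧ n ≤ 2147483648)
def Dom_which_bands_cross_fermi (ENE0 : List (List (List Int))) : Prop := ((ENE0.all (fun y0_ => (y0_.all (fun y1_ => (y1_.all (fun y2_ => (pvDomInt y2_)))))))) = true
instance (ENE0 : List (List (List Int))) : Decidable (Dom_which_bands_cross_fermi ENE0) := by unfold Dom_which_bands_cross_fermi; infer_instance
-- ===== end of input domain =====

-- B replaces A's indexed adjacent-pair scan (flag + break) by a per-band min/max sign
-- test on the first components; objective: simpler.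

-- ===== PORT A =====
-- e[0] (inner lists are nonempty on Pre_, so the default is never used there)
def pvFirst (e : List Int) : Int := PySem.List.pyGetD e 0 0

-- the inner 'for nj in range(1, len(i)): if i[nj][0]*i[nj-1][0] <= 0: isfermi = 1; break'
def pvALoop (i : List (List Int)) : List Int → Bool
  | [] => false
  | nj :: rest =>
      if pvFirst (PySem.List.pyGetD i nj []) * pvFirst (PySem.List.pyGetD i (nj - 1) []) ≤ 0
      then true
      else pvALoop i rest

def pvACheck (i : List (List Int)) : Bool :=
  pvALoop i (PySem.List.pyRange 1 (i.length : Int) 1)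

def which_bands_cross_fermi (ENE0 : List (List (List Int))) : List (List (List Int)) :=
  ENE0.foldl (fun ENE i => if pvACheck i then ENE ++ [i] else ENE) []

-- ===== PORT B =====
def pvCrosses (band : List (List Int)) : Bool :=
  if band.length < 2 then false
  else
    let vals := band.map (fun e => PySem.List.pyGetD e 0 0)
    decide ((PySem.List.min? vals (fun x => x)).getD 0 ≤ 0 ∧
            0 ≤ (PySem.List.max? vals (fun x => x)).getD 0)

def which_bands_cross_fermi_alt (ENE0 : List (List (List Int))) : List (List (List Int)) :=
  ENE0.filter pvCrosses

-- ===== PRECONDITION & SPEC =====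
-- Pre_ requires every inner list of every band of length ≥ 2 to be nonempty: on a band
-- holding an empty inner list Python raises IndexError at i[nj][0] (A whenever the scan
-- reaches it, B always); this slightly narrows A's domain, since A's break can return
-- before reaching an empty inner list (see the cite in claim.json).
def Pre_which_bands_cross_fermi (ENE0 : List (List (List Int))) : Prop :=
  ∀ i ∈ ENE0, 2 ≤ i.length → ∀ e ∈ i, e ≠ []
instance (ENE0 : List (List (List Int))) : Decidable (Pre_which_bands_cross_fermi ENE0) := by
  unfold Pre_which_bands_cross_fermi; infer_instance

def pvWitness_which_bands_cross_fermi : List (List (List Int)) := [[[1], [-1]], [[2], [3]]]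

def Spec_which_bands_cross_fermi (ENE0 : List (List (List Int))) (out : List (List (List Int))) : Prop := out = which_bands_cross_fermi_alt ENE0
instance (ENE0 : List (List (List Int))) (out : List (List (List Int))) : Decidable (Spec_which_bands_cross_fermi ENE0 out) := by unfold Spec_which_bands_cross_fermi; infer_instance

-- ===== CLAIM (what is proved, stated in full; the proofs are below) =====
def Claim_equal_which_bands_cross_fermi : Prop := ∀ (ENE0 : List (List (List Int))), Dom_which_bands_cross_fermi ENE0 → Pre_which_bands_cross_fermi ENE0 → Spec_which_bands_cross_fermi ENE0 (which_bands_cross_fermi ENE0)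

-- ===== LEMMAS AND PROOFS =====

-- A's scan of vals[nj]*vals[nj-1], rephrased structurally on the list of first components
def pvPairScan : List Int → Bool
  | x :: y :: rest => if y * x ≤ 0 then true else pvPairScan (y :: rest)
  | _ => false

lemma pvPairScan_short (v : List Int) (h : v.length ≤ 1) : pvPairScan v = false := by
  match v, h with
  | [], _ => rfl
  | [_], _ => rfl

lemma pvFirst_getD (xs : List (List Int)) (n : Nat) :
    pvFirst (xs.getD n []) = (xs.map pvFirst).getD n 0 := by
  simp [List.getD_eq_getElem?_getD, List.getElem?_map]
  cases xs[n]? <;> simp [pvFirst, PySem.List.pyGetD, PySem.List.pyGet?]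

lemma pvALoop_eq (i : List (List Int)) (k : Nat) :
    pvALoop i (PySem.List.pyRange ((k : Int) + 1) (i.length : Int) 1)
      = pvPairScan ((i.map pvFirst).drop k) := by
  by_cases h : i.length ≤ k + 1
  · rw [PySem.List.pyRange_one_eq_nil (by exact_mod_cast h)]
    rw [pvPairScan_short _ (by simp; omega)]
    rfl
  · push Not at h
    have hk1 : k + 1 < (i.map pvFirst).length := by simpa using h
    have hk0 : k < (i.map pvFirst).length := by omega
    rw [PySem.List.pyRange_one_cons (by exact_mod_cast h)]
    have hrec := pvALoop_eq i (k + 1)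
    rw [List.drop_eq_getElem_cons hk0, List.drop_eq_getElem_cons hk1] at *
    show (if _ then _ else _) = _
    have e1 : ((k : Int) + 1) = ((k + 1 : Nat) : Int) := by push_cast; ring
    have e2 : (((k + 1 : Nat) : Int) - 1) = ((k : Nat) : Int) := by push_cast; ring
    rw [e1, e2, PySem.List.pyGetD_natCast, PySem.List.pyGetD_natCast,
        pvFirst_getD, pvFirst_getD,
        List.getD_eq_getElem _ _ hk1, List.getD_eq_getElem _ _ hk0]
    unfold pvPairScan
    split_ifs with hle
    · rfl
    · exact hrec
termination_by i.length - k

lemma pvPairScan_iff (v : List Int) (h : 2 ≤ v.length) :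
    pvPairScan v = true ↔ (∃ a ∈ v, a ≤ 0) ∧ (∃ b ∈ v, 0 ≤ b) := by
  match v, h with
  | x :: y :: rest, _ =>
    unfold pvPairScan
    by_cases hle : y * x ≤ 0
    · simp only [hle, if_true, true_iff]
      by_cases hx : x ≤ 0
      · refine ⟨⟨x, by simp, hx⟩, ?_⟩
        by_cases hy : 0 ≤ y
        · exact ⟨y, by simp, hy⟩
        · have hx0 : x = 0 := by nlinarith
          exact ⟨x, by simp, by omega⟩
      · push Not at hx
        have hy : y ≤ 0 := by nlinarith
        exact ⟨⟨y, by simp, hy⟩, ⟨x, by simp, by omega⟩⟩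
    · push Not at hle
      have hx0 : x ≠ 0 := by rintro rfl; simp at hle
      have hy0 : y ≠ 0 := by rintro rfl; simp at hle
      simp only [hle.not_ge, if_false]
      match rest with
      | [] =>
        simp only [pvPairScan]
        constructor
        · intro hf; exact absurd hf (by simp)
        · rintro ⟨⟨a, ha, ha0⟩, ⟨b, hb, hb0⟩⟩
          exfalso
          simp only [List.mem_cons, List.not_mem_nil, or_false] at ha hb
          rcases lt_or_gt_of_ne hx0 with hx | hx
          · have hy : y < 0 := by nlinarith
            rcases hb with rfl | rfl <;> omega
          · have hy : 0 < y := by nlinarith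
            rcases ha with rfl | rfl <;> omega
      | z :: rest' =>
        rw [pvPairScan_iff (y :: z :: rest') (by simp)]
        constructor
        · rintro ⟨⟨a, ha, ha0⟩, ⟨b, hb, hb0⟩⟩
          exact ⟨⟨a, List.mem_cons_of_mem _ ha, ha0⟩, ⟨b, List.mem_cons_of_mem _ hb, hb0⟩⟩
        · rintro ⟨⟨a, ha, ha0⟩, ⟨b, hb, hb0⟩⟩
          refine ⟨?_, ?_⟩
          · rcases List.mem_cons.1 ha with rfl | ha'
            · refine ⟨y, by simp, ?_⟩
              rcases lt_or_gt_of_ne hx0 with hx | hx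
              · nlinarith
              · omega
            · exact ⟨a, ha', ha0⟩
          · rcases List.mem_cons.1 hb with rfl | hb'
            · refine ⟨y, by simp, ?_⟩
              rcases lt_or_gt_of_ne hx0 with hx | hx
              · omega
              · nlinarith
            · exact ⟨b, hb', hb0⟩

lemma pvMin_iff (v : List Int) (hv : v ≠ []) :
    ((PySem.List.min? v (fun x => x)).getD 0 ≤ 0 ↔ ∃ a ∈ v, a ≤ 0) := by
  obtain ⟨m, hm⟩ : ∃ m, PySem.List.min? v (fun x => x) = some m := by
    cases h : PySem.List.min? v (fun x => x)
    · exact absurd ((PySem.List.min?_eq_none_iff _ _).1 h) hv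
    · exact ⟨_, rfl⟩
  rw [hm]
  constructor
  · exact fun h => ⟨m, PySem.List.min?_mem hm, h⟩
  · rintro ⟨a, ha, ha0⟩
    exact le_trans (PySem.List.min?_isMin hm a ha) ha0

lemma pvMax_iff (v : List Int) (hv : v ≠ []) :
    (0 ≤ (PySem.List.max? v (fun x => x)).getD 0 ↔ ∃ b ∈ v, 0 ≤ b) := by
  obtain ⟨m, hm⟩ : ∃ m, PySem.List.max? v (fun x => x) = some m := by
    cases h : PySem.List.max? v (fun x => x)
    · exact absurd ((PySem.List.max?_eq_none_iff _ _).1 h) hv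
    · exact ⟨_, rfl⟩
  rw [hm]
  constructor
  · exact fun h => ⟨m, PySem.List.max?_mem hm, h⟩
  · rintro ⟨b, hb, hb0⟩
    exact le_trans hb0 (PySem.List.max?_isMax hm b hb)

lemma pvCheck_eq (i : List (List Int)) : pvACheck i = pvCrosses i := by
  have h0 : pvACheck i = pvPairScan (i.map pvFirst) := by
    have := pvALoop_eq i 0
    simpa [pvACheck] using this
  rw [h0]
  unfold pvCrosses
  split_ifs with hlen
  · exact pvPairScan_short _ (by simp; omega)
  · push Not at hlen
    have h2 : 2 ≤ (i.map pvFirst).length := by simpa using hlen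
    have hne : (i.map pvFirst) ≠ [] := by
      intro h; rw [h] at h2; simp at h2
    show pvPairScan (i.map pvFirst) =
      decide ((PySem.List.min? (i.map pvFirst) (fun x => x)).getD 0 ≤ 0 ∧
              0 ≤ (PySem.List.max? (i.map pvFirst) (fun x => x)).getD 0)
    by_cases hmm : ((PySem.List.min? (i.map pvFirst) (fun x => x)).getD 0 ≤ 0 ∧
              0 ≤ (PySem.List.max? (i.map pvFirst) (fun x => x)).getD 0)
    · rw [decide_eq_true hmm]
      exact (pvPairScan_iff _ h2).2 ⟨(pvMin_iff _ hne).1 hmm.1, (pvMax_iff _ hne).1 hmm.2⟩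
    · rw [decide_eq_false hmm]
      cases hps : pvPairScan (i.map pvFirst) with
      | false => rfl
      | true =>
        obtain ⟨ha, hb⟩ := (pvPairScan_iff _ h2).1 hps
        exact absurd ⟨(pvMin_iff _ hne).2 ha, (pvMax_iff _ hne).2 hb⟩ hmm

lemma pvFoldl_filter (ENE0 : List (List (List Int))) (acc : List (List (List Int))) :
    ENE0.foldl (fun ENE i => if pvACheck i then ENE ++ [i] else ENE) acc
      = acc ++ ENE0.filter pvACheck := by
  induction ENE0 generalizing acc with
  | nil => simp
  | cons i rest ih =>
    simp only [List.foldl_cons, List.filter_cons]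
    by_cases h : pvACheck i
    · rw [if_pos h, ih, h]; simp
    · rw [if_neg h, ih]
      simp [h]

-- ===== VERDICT (by name: the statement is the Claim_ definition above) =====
theorem which_bands_cross_fermi_spec : Claim_equal_which_bands_cross_fermi := by
  intro ENE0 _ _
  unfold Spec_which_bands_cross_fermi which_bands_cross_fermi which_bands_cross_fermi_alt
  rw [pvFoldl_filter, List.nil_append]
  exact List.filter_congr (fun i _ => pvCheck_eq i)
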